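-- pv_equiv track=rewrite | github.com/olivercalder/association-rule | eclat.py | get_itemsets
-- ===== SOURCE A (Python) =====
-- def get_itemsets(bit_vectors, items):
--     # items is a list of item names, where the index of a given item name
--     # corresponds to the bit index of the item in the item bit vectors.
--     itemsets = []
--     for entry in bit_vectors:
--         item_vector = entry[0]
--         itemset = []
--         for i in range(len(items)):
--             if item_vector & (1 << i):
--                 itemset.append(items[i])
--         itemsets.append(itemset)
--     return itemsets
-- ===== SOURCE B (Python) =====
-- def get_itemsets(bit_vectors, items):
--     # items is a list of item names, where the index of a given item name
--     # corresponds to the bit index of the item in the item bit vectors.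
--     n = len(items)
--     modulus = 1 << n
--     itemsets = []
--     for entry in bit_vectors:
--         v = entry[0] % modulus  # keep only the n relevant bits (nonnegative)
--         itemset = []
--         while v:
--             i = v.bit_length() - 1  # highest set bit
--             itemset.append(items[i])
--             v -= 1 << i
--         itemset.reverse()
--         itemsets.append(itemset)
--     return itemsets
-- ===== Notes on version B (the rewrite author's own statement) =====
-- stated objective: alternative
-- what changed: Instead of testing every one of the len(items) bit positions per entry, B reduces the vector modulo 2^len(items) and peels off only the set bits from the top via bit_length; it trades the full positional scan for one loop iteration per set bit.
import Mathlib
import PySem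

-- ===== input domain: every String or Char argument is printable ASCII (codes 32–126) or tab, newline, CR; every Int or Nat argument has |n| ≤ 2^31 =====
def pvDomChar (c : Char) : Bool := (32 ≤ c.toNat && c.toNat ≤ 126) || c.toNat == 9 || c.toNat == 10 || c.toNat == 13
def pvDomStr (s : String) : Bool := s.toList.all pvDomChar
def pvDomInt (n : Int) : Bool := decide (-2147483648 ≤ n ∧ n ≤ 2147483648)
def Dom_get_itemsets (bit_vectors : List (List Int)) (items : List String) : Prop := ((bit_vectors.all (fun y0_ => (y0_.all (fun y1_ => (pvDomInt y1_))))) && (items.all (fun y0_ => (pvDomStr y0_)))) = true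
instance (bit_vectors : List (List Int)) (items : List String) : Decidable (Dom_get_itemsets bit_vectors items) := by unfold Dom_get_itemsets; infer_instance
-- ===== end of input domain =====

-- B replaces A's scan of every bit position with a peel-off loop over the set bits only
-- (entry[0] % 2^len(items), then repeatedly remove the highest set bit via bit_length).

-- ===== PORT A =====
-- A: for each entry, item_vector = entry[0]; scan i in range(len(items)), append items[i] when bit i is set.
def get_itemsets (bit_vectors : List (List Int)) (items : List String) : List (List String) :=
  bit_vectors.foldl (fun itemsets entry =>
    let item_vector : Int := (PySem.List.pyGet? entry 0).getD 0   -- entry[0]; Pre_ excludes empty entries (IndexError)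
    let itemset : List String :=
      (PySem.List.pyRange 0 (items.length : Int)).foldl (fun acc i =>
        if PySem.Int.band item_vector ((1 : Int) <<< i.toNat) ≠ 0 then
          acc ++ [PySem.List.pyGetD items i ""]    -- items[i]; i < len items on every reached branch
        else acc) []
    itemsets ++ [itemset]) []

-- ===== PORT B =====
-- B helper: while v: i = v.bit_length() - 1; itemset.append(items[i]); v -= 1 << i
def pvPeelLoop (items : List String) (v : Int) (itemset : List String) : List String :=
  if _h : v ≤ 0 then itemset    -- `while v:`; v is always ≥ 0 here, so falsity of the guard is v = 0
  else
    pvPeelLoop items (v - (1 : Int) <<< (PySem.Int.bitLength v - 1))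
      (itemset ++ [PySem.List.pyGetD items ((PySem.Int.bitLength v - 1 : Nat) : Int) ""])
termination_by v.toNat
decreasing_by
  have h0 : 0 < (2 : Nat) ^ (PySem.Int.bitLength v - 1) := Nat.two_pow_pos _
  have hc : ((2 ^ (PySem.Int.bitLength v - 1) : Nat) : Int)
      = 2 ^ (PySem.Int.bitLength v - 1) := by push_cast; ring
  rw [Int.shiftLeft_eq, one_mul]
  omega

def get_itemsets_alt (bit_vectors : List (List Int)) (items : List String) : List (List String) :=
  let n := items.length
  let modulus : Int := (1 : Int) <<< n
  bit_vectors.foldl (fun itemsets entry =>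
    let v : Int := PySem.Int.mod ((PySem.List.pyGet? entry 0).getD 0) modulus   -- entry[0] % modulus
    itemsets ++ [(pvPeelLoop items v []).reverse]) []

-- ===== PRECONDITION & SPEC =====
-- Pre_ excludes exactly the inputs where Python A raises: an entry that is the empty list (entry[0] is an IndexError).
def Pre_get_itemsets (bit_vectors : List (List Int)) (items : List String) : Prop :=
  ∀ e ∈ bit_vectors, e ≠ []
instance (bit_vectors : List (List Int)) (items : List String) : Decidable (Pre_get_itemsets bit_vectors items) := by unfold Pre_get_itemsets; infer_instance
def pvWitness_get_itemsets : List (List Int) × List String := ([[5], [0], [-2]], ["a", "b", "c"])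

def Spec_get_itemsets (bit_vectors : List (List Int)) (items : List String) (out : List (List String)) : Prop := out = get_itemsets_alt bit_vectors items
instance (bit_vectors : List (List Int)) (items : List String) (out : List (List String)) : Decidable (Spec_get_itemsets bit_vectors items out) := by unfold Spec_get_itemsets; infer_instance

-- ===== CLAIM (what is proved, stated in full; the proofs are below) =====
def Claim_equal_get_itemsets : Prop := ∀ (bit_vectors : List (List Int)) (items : List String), Dom_get_itemsets bit_vectors items → Pre_get_itemsets bit_vectors items → Spec_get_itemsets bit_vectors items (get_itemsets bit_vectors items)

-- ===== LEMMAS AND PROOFS =====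

lemma pv_toNat_two_pow (n : Nat) : ((2 : Int) ^ n).toNat = 2 ^ n := by
  rw [show ((2 : Int) ^ n) = ((2 ^ n : Nat) : Int) by push_cast; ring, Int.toNat_natCast]

-- Nat: the bit i of x, read as x &&& 2^i, is the difference of consecutive mod-powers.
lemma pv_nat_and_two_pow_mod (x i : Nat) : x % 2 ^ (i + 1) = x % 2 ^ i + (x &&& 2 ^ i) := by
  rw [pow_succ, Nat.mod_mul, Nat.and_two_pow]
  rcases Nat.mod_two_eq_zero_or_one (x / 2 ^ i) with h | h <;>
    simp [Nat.testBit, h, Nat.shiftRight_eq_div_pow]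

-- Int emod of a negative number, in terms of -v-1.
lemma pv_emod_neg (u : Nat) (m : Int) (hm : 0 < m) :
    (-(u : Int) - 1) % m = m - 1 - ((u : Int) % m) := by
  have h1 : (-(u : Int) - 1) = (m - 1 - ((u : Int) % m)) + m * (-((u : Int) / m) - 1) := by
    have := Int.mul_ediv_add_emod (u : Int) m
    ring_nf
    omega
  have h2 : 0 ≤ (u : Int) % m := Int.emod_nonneg _ (by omega)
  have h3 : (u : Int) % m < m := Int.emod_lt_of_pos _ hm
  rw [h1, Int.add_mul_emod_self_left, Int.emod_eq_of_lt (by omega) (by omega)]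

-- Python-exact band against a power of two = difference of consecutive emod-powers, for EVERY integer.
lemma pv_one_shl_int (n : Nat) : (1 : Int) <<< ((n : Int)) = (2 : Int) ^ n := by
  show ((Nat.shiftLeft' false 1 n : Nat) : Int) = (2 : Int) ^ n
  rw [Nat.shiftLeft'_false, Nat.one_shiftLeft]
  push_cast
  ring

lemma pv_band_two_pow (v : Int) (n : Nat) :
    PySem.Int.band v ((2 : Int) ^ n) = v % 2 ^ (n + 1) - v % 2 ^ n := by
  rcases le_or_gt 0 v with hv | hv
  · obtain ⟨x, rfl⟩ := Int.eq_ofNat_of_zero_le hv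
    rw [PySem.Int.band_of_nonneg (by positivity) (by positivity), pv_toNat_two_pow,
      Int.toNat_natCast]
    have hb := pv_nat_and_two_pow_mod x n
    have c1 : ((x : Int)) % 2 ^ (n + 1) = ((x % 2 ^ (n + 1) : Nat) : Int) := by push_cast; ring
    have c2 : ((x : Int)) % 2 ^ n = ((x % 2 ^ n : Nat) : Int) := by push_cast; ring
    rw [c1, c2]
    omega
  · -- v < 0 : band takes the branch ↑(b.toNat - (b.toNat &&& (-v - 1).toNat))
    have hb : (0 : Int) ≤ 2 ^ n := by positivity
    have hneg : ¬ (0 : Int) ≤ v := by omega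
    unfold PySem.Int.band
    simp only [hneg, if_false, hb, if_true]
    set u : Nat := (-v - 1).toNat with hu
    have hvu : v = -(u : Int) - 1 := by omega
    have hand : ((2 : Int) ^ n).toNat &&& u = u &&& 2 ^ n := by
      rw [pv_toNat_two_pow]; exact Nat.and_comm _ _
    have hle : u &&& 2 ^ n ≤ 2 ^ n := Nat.and_le_right
    have hlem := pv_nat_and_two_pow_mod u n
    have e1 : (-(u : Int) - 1) % 2 ^ (n + 1) = 2 ^ (n + 1) - 1 - ((u : Int) % 2 ^ (n + 1)) :=
      pv_emod_neg u _ (by positivity)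
    have e2 : (-(u : Int) - 1) % 2 ^ n = 2 ^ n - 1 - ((u : Int) % 2 ^ n) :=
      pv_emod_neg u _ (by positivity)
    have cu1 : ((u : Int)) % 2 ^ (n + 1) = ((u % 2 ^ (n + 1) : Nat) : Int) := by push_cast; ring
    have cu2 : ((u : Int)) % 2 ^ n = ((u % 2 ^ n : Nat) : Int) := by push_cast; ring
    have hc1 : ((2 ^ n : Nat) : Int) = 2 ^ n := by push_cast; ring
    have hc2 : ((2 ^ (n + 1) : Nat) : Int) = 2 ^ (n + 1) := by push_cast; ring
    have h2n' : ((2 : Nat) ^ (n + 1)) = 2 * 2 ^ n := by ring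
    rw [hand, pv_toNat_two_pow, hvu, e1, e2]
    omega

-- band v (1 <<< n) is either 0 or 2^n.
lemma pv_band_cases (v : Int) (n : Nat) :
    PySem.Int.band v ((2 : Int) ^ n) = 0 ∨ PySem.Int.band v ((2 : Int) ^ n) = 2 ^ n := by
  rw [pv_band_two_pow]
  have hpos : (0 : Int) < 2 ^ n := by positivity
  have hdvd : (2 : Int) ^ n ∣ 2 ^ (n + 1) := pow_dvd_pow 2 (by omega)
  have h2 : 0 ≤ v % 2 ^ (n + 1) := Int.emod_nonneg _ (by positivity)
  have h3 : v % 2 ^ (n + 1) < 2 ^ (n + 1) := Int.emod_lt_of_pos _ (by positivity)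
  have h4 : 0 ≤ v % 2 ^ n := Int.emod_nonneg _ (by omega)
  have h5 : v % 2 ^ n < 2 ^ n := Int.emod_lt_of_pos _ hpos
  have h6 : (v % 2 ^ (n + 1)) % 2 ^ n = v % 2 ^ n := Int.emod_emod_of_dvd v hdvd
  have hq := Int.mul_ediv_add_emod (v % 2 ^ (n + 1)) (2 ^ n)
  rw [h6] at hq
  have h8 : 0 ≤ v % 2 ^ (n + 1) / 2 ^ n := Int.ediv_nonneg h2 (by omega)
  have h9 : v % 2 ^ (n + 1) / 2 ^ n < 2 := by
    apply Int.ediv_lt_of_lt_mul hpos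
    have : (2 : Int) ^ (n + 1) = 2 * 2 ^ n := by ring
    omega
  have hq01 : v % 2 ^ (n + 1) / 2 ^ n = 0 ∨ v % 2 ^ (n + 1) / 2 ^ n = 1 := by omega
  rcases hq01 with h | h <;> rw [h] at hq <;> [rw [mul_zero] at hq; rw [mul_one] at hq] <;> omega

-- bitLength is pinned between consecutive powers of two.
lemma pv_bitLength_eq (m : Int) (n : Nat) (h1 : 2 ^ n ≤ m) (h2 : m < 2 ^ (n + 1)) :
    PySem.Int.bitLength m = n + 1 := by
  have hp : (0 : Int) < 2 ^ n := by positivity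
  have hm0 : m ≠ 0 := by omega
  have ha : m.natAbs < 2 ^ PySem.Int.bitLength m := PySem.Int.lt_two_pow_bitLength m
  have hb : 2 ^ (PySem.Int.bitLength m - 1) ≤ m.natAbs := PySem.Int.two_pow_bitLength_le m hm0
  have hc1 : ((2 ^ n : Nat) : Int) = 2 ^ n := by push_cast; ring
  have hc2 : ((2 ^ (n + 1) : Nat) : Int) = 2 ^ (n + 1) := by push_cast; ring
  have hlo : 2 ^ n ≤ m.natAbs := by omega
  have hhi : m.natAbs < 2 ^ (n + 1) := by omega
  have l1 : n < PySem.Int.bitLength m :=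
    (Nat.pow_lt_pow_iff_right (by omega)).mp (lt_of_le_of_lt hlo ha)
  have l2 : PySem.Int.bitLength m - 1 < n + 1 :=
    (Nat.pow_lt_pow_iff_right (by omega)).mp (lt_of_le_of_lt hb hhi)
  omega

-- the peel loop's accumulator comes out in front
lemma pv_peelLoop_acc_bounded (items : List String) :
    ∀ (k : Nat) (v : Int) (acc : List String), v.toNat ≤ k →
      pvPeelLoop items v acc = acc ++ pvPeelLoop items v [] := by
  intro k
  induction k with
  | zero =>
    intro v acc h
    have hv : v ≤ 0 := by omega
    conv_lhs => rw [pvPeelLoop.eq_def]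
    conv_rhs => rw [pvPeelLoop.eq_def]
    simp [hv]
  | succ k ih =>
    intro v acc h
    by_cases hv : v ≤ 0
    · conv_lhs => rw [pvPeelLoop.eq_def]
      conv_rhs => rw [pvPeelLoop.eq_def]
      simp [hv]
    · have hdec : (v - (1 : Int) <<< (PySem.Int.bitLength v - 1)).toNat ≤ k := by
        have h1 := PySem.Int.two_pow_bitLength_le v (by omega)
        have h0 : 0 < (2 : Nat) ^ (PySem.Int.bitLength v - 1) := Nat.two_pow_pos _
        have hc : ((2 ^ (PySem.Int.bitLength v - 1) : Nat) : Int)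
            = 2 ^ (PySem.Int.bitLength v - 1) := by push_cast; ring
        rw [Int.shiftLeft_eq, one_mul]
        omega
      conv_lhs => rw [pvPeelLoop.eq_def]
      conv_rhs => rw [pvPeelLoop.eq_def]
      simp only [dif_neg hv]
      rw [ih _ (acc ++ [PySem.List.pyGetD items ((PySem.Int.bitLength v - 1 : Nat) : Int) ""]) hdec,
        ih _ ([] ++ [PySem.List.pyGetD items ((PySem.Int.bitLength v - 1 : Nat) : Int) ""]) hdec]
      simp

lemma pv_peelLoop_acc (items : List String) (v : Int) (acc : List String) :
    pvPeelLoop items v acc = acc ++ pvPeelLoop items v [] :=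
  pv_peelLoop_acc_bounded items v.toNat v acc (le_refl _)

-- the per-entry core: A's scan over range(len(items)) equals B's peel of entry[0] % 2^n.
lemma pv_inner (items : List String) (v : Int) (n : Nat) :
    (PySem.List.pyRange 0 (n : Int)).foldl (fun acc i =>
        if PySem.Int.band v ((1 : Int) <<< i.toNat) ≠ 0 then
          acc ++ [PySem.List.pyGetD items i ""]
        else acc) []
      = (pvPeelLoop items (PySem.Int.mod v ((1 : Int) <<< n)) []).reverse := by
  induction n with
  | zero =>
    have hr : PySem.List.pyRange 0 ((0 : Nat) : Int) = [] := by decide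
    have hm : PySem.Int.mod v ((1 : Int) <<< (0 : Nat)) = 0 := by
      rw [show ((1 : Int) <<< (0 : Nat)) = 1 by decide,
        PySem.Int.mod_eq_emod_of_pos one_pos, Int.emod_one]
    rw [hr, hm, pvPeelLoop.eq_def]
    simp
  | succ n ih =>
    have hpos : (0 : Int) < 2 ^ n := by positivity
    have hrange : PySem.List.pyRange 0 ((n : Int) + 1)
        = PySem.List.pyRange 0 (n : Int) ++ [(n : Int)] :=
      PySem.List.pyRange_one_succ_right (by exact_mod_cast Nat.zero_le n)
    have hcast : ((n + 1 : Nat) : Int) = (n : Int) + 1 := by push_cast; ring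
    rw [hcast, hrange, List.foldl_append]
    have hm : PySem.Int.mod v ((1 : Int) <<< n) = v % 2 ^ n := by
      rw [Int.shiftLeft_eq, one_mul]; exact PySem.Int.mod_eq_emod_of_pos hpos
    have hm1 : PySem.Int.mod v ((1 : Int) <<< (n + 1)) = v % 2 ^ (n + 1) := by
      rw [Int.shiftLeft_eq, one_mul]; exact PySem.Int.mod_eq_emod_of_pos (by positivity)
    have hband := pv_band_two_pow v n
    have hmod_nonneg : 0 ≤ v % 2 ^ n := Int.emod_nonneg _ (by omega)
    have hmod_lt : v % 2 ^ n < 2 ^ n := Int.emod_lt_of_pos _ hpos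
    have htn : ((n : Int)).toNat = n := Int.toNat_natCast n
    simp only [List.foldl_cons, List.foldl_nil, Int.toNat_natCast, pv_one_shl_int] at ih ⊢
    rcases pv_band_cases v n with h0 | h1
    · -- bit n clear: mods agree, branch not taken
      rw [if_neg (not_ne_iff.mpr h0), ih, hm, hm1,
        show v % 2 ^ (n + 1) = v % 2 ^ n from by omega]
    · -- bit n set: the high bit peels first
      rw [if_pos (by rw [h1]; exact (by positivity : (0 : Int) < 2 ^ n).ne'), ih, hm, hm1,
        show v % 2 ^ (n + 1) = v % 2 ^ n + 2 ^ n from by omega]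
      have hmle : ¬ (v % 2 ^ n + 2 ^ n ≤ 0) := by omega
      have hbl : PySem.Int.bitLength (v % 2 ^ n + 2 ^ n) = n + 1 := by
        apply pv_bitLength_eq _ n (by omega)
        have : (2 : Int) ^ (n + 1) = 2 ^ n + 2 ^ n := by ring
        omega
      conv_rhs => rw [pvPeelLoop.eq_def]
      rw [dif_neg hmle, hbl]
      simp only [Nat.add_sub_cancel, Int.shiftLeft_eq, one_mul, add_sub_cancel_right]
      conv_rhs => rw [pv_peelLoop_acc]
      simp

-- ===== VERDICT (by name: the statement is the Claim_ definition above) =====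
theorem get_itemsets_spec : Claim_equal_get_itemsets := by
  intro bvs items _ _
  unfold Spec_get_itemsets get_itemsets get_itemsets_alt
  simp only [PySem.List.foldl_append_singleton_eq_map, List.nil_append]
  apply List.map_congr_left
  intro entry _
  have := pv_inner items ((PySem.List.pyGet? entry 0).getD 0) items.length
  simpa using this
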